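-- pv_equiv track=rewrite | github.com/niragui/discord_bot | src/utils.py | is_spotify_id
-- ===== SOURCE A (Python) =====
-- ID_STANDARD_LENGTH = 22
--
-- def is_spotify_id(possible_id: str):
--     """
--     Check if a string matches the basic needs for being a Spotify ID
--
--     Parameters:
--         - possible_id: String that could be an id
--     """
--     if len(possible_id) < ID_STANDARD_LENGTH:
--         return False
--
--     if not any(char.isdigit() for char in possible_id):
--         return False
--
--     if all(char.isdigit() for char in possible_id):
--         return False
--
--     if possible_id.isdecimal():
--         return False
--
--     if possible_id.upper() == possible_id:
--         return False
--
--     if possible_id.lower() == possible_id: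
--         return False
--
--     return True
-- ===== SOURCE B (Python) =====
-- ID_STANDARD_LENGTH = 22
--
-- def is_spotify_id(possible_id: str):
--     """Single-pass flag check: same result as the multi-scan original."""
--     if len(possible_id) < ID_STANDARD_LENGTH:
--         return False
--     has_digit = has_non_digit = has_lower = has_upper = False
--     for ch in possible_id:
--         if ch.isdigit():
--             has_digit = True
--         else:
--             has_non_digit = True
--         if ch.upper() != ch:
--             has_lower = True
--         if ch.lower() != ch:
--             has_upper = True
--     return has_digit and has_non_digit and has_lower and has_upper
-- ===== Notes on version B (the rewrite author's own statement) =====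
-- stated objective: simpler
-- what changed: Replaced A's six sequential whole-string scans (any/all digit scans, isdecimal, upper()/lower() comparisons) by one linear pass that accumulates four boolean flags per character, dropping the unreachable isdecimal check.
import Mathlib
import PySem

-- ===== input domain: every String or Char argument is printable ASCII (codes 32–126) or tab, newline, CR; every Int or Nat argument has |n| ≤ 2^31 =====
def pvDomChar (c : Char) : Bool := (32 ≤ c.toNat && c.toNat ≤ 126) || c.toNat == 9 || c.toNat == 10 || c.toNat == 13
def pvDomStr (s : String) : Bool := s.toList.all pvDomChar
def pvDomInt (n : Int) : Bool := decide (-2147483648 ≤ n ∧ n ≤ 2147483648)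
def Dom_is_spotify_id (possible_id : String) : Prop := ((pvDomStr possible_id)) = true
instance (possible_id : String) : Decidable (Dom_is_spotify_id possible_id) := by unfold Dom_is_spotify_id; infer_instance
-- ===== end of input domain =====

-- B replaces A's six sequential whole-string scans by one flag-gathering pass (objective: simpler).

-- ===== PORT A =====
-- str.isdecimal(): exact on the ASCII domain, where decimal digits are exactly '0'-'9'
def pvStrIsdecimal (s : String) : Bool :=
  !s.toList.isEmpty && s.toList.all PySem.Chars.isdigit

def is_spotify_id (possible_id : String) : Bool :=
  if PySem.Str.len possible_id < 22 then false
  else if !(possible_id.toList.any (fun c => PySem.Chars.isdigit c)) then false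
  else if possible_id.toList.all (fun c => PySem.Chars.isdigit c) then false
  else if pvStrIsdecimal possible_id then false
  else if PySem.Str.upper possible_id == possible_id then false
  else if PySem.Str.lower possible_id == possible_id then false
  else true

-- ===== PORT B =====
def is_spotify_id_alt (possible_id : String) : Bool :=
  if PySem.Str.len possible_id < 22 then false
  else
    let st := possible_id.toList.foldl
      (fun (st : Bool × Bool × Bool × Bool) c =>
        ((if PySem.Chars.isdigit c then true else st.1),
         (if PySem.Chars.isdigit c then st.2.1 else true),
         (if PySem.Chars.upperChar c ≠ c then true else st.2.2.1),
         (if PySem.Chars.lowerChar c ≠ c then true else st.2.2.2)))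
      (false, false, false, false)
    st.1 && st.2.1 && st.2.2.1 && st.2.2.2

-- ===== PRECONDITION & SPEC =====
def Spec_is_spotify_id (possible_id : String) (out : Bool) : Prop := out = is_spotify_id_alt possible_id
instance (possible_id : String) (out : Bool) : Decidable (Spec_is_spotify_id possible_id out) := by unfold Spec_is_spotify_id; infer_instance

-- ===== CLAIM (what is proved, stated in full; the proofs are below) =====
def Claim_equal_is_spotify_id : Prop := ∀ (possible_id : String), Dom_is_spotify_id possible_id → Spec_is_spotify_id possible_id (is_spotify_id possible_id)

-- ===== LEMMAS AND PROOFS =====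
theorem flags_foldl (l : List Char) (a b c2 d : Bool) :
    l.foldl (fun (st : Bool × Bool × Bool × Bool) c =>
        ((if PySem.Chars.isdigit c then true else st.1),
         (if PySem.Chars.isdigit c then st.2.1 else true),
         (if PySem.Chars.upperChar c ≠ c then true else st.2.2.1),
         (if PySem.Chars.lowerChar c ≠ c then true else st.2.2.2)))
      (a, b, c2, d)
    = (a || l.any (fun c => PySem.Chars.isdigit c),
       b || l.any (fun c => !PySem.Chars.isdigit c),
       c2 || l.any (fun c => decide (PySem.Chars.upperChar c ≠ c)),
       d || l.any (fun c => decide (PySem.Chars.lowerChar c ≠ c))) := by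
  induction l generalizing a b c2 d with
  | nil => simp
  | cons x xs ih =>
    simp only [List.foldl_cons, List.any_cons, ih]
    by_cases h1 : PySem.Chars.isdigit x <;>
      by_cases h2 : PySem.Chars.upperChar x = x <;>
        by_cases h3 : PySem.Chars.lowerChar x = x <;>
          simp [h1, h2, h3]

theorem map_eq_self_iff {α : Type} (f : α → α) (l : List α) :
    l.map f = l ↔ ∀ x ∈ l, f x = x := by
  induction l with
  | nil => simp
  | cons x xs ih => simp [ih]

theorem upper_eq_iff (s : String) :
    (PySem.Str.upper s == s) = !s.toList.any (fun c => decide (PySem.Chars.upperChar c ≠ c)) := by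
  have key : PySem.Str.upper s = s ↔ ∀ c ∈ s.toList, PySem.Chars.upperChar c = c := by
    rw [← String.toList_inj, PySem.Str.toList_upper, PySem.Chars.upper]
    exact map_eq_self_iff _ _
  rcases Bool.eq_false_or_eq_true (s.toList.any fun c => decide (PySem.Chars.upperChar c ≠ c)) with h | h
  case inl => rw [h, Bool.not_true]
              rcases Bool.eq_false_or_eq_true (PySem.Str.upper s == s) with hb | hb
              · exfalso
                obtain ⟨c, hc, hne⟩ := List.any_eq_true.mp h
                exact (by simpa using hne : PySem.Chars.upperChar c ≠ c) (key.mp (beq_iff_eq.mp hb) c hc)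
              · exact hb
  · rw [h]
    have h' : ∀ c ∈ s.toList, PySem.Chars.upperChar c = c := by
      intro c hc
      by_contra hne
      have ht : (s.toList.any fun c => decide (PySem.Chars.upperChar c ≠ c)) = true :=
        List.any_eq_true.mpr ⟨c, hc, by simpa using hne⟩
      rw [h] at ht
      exact absurd ht (by decide)
    simp [key.mpr h']

theorem lower_eq_iff (s : String) :
    (PySem.Str.lower s == s) = !s.toList.any (fun c => decide (PySem.Chars.lowerChar c ≠ c)) := by
  have key : PySem.Str.lower s = s ↔ ∀ c ∈ s.toList, PySem.Chars.lowerChar c = c := by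
    rw [← String.toList_inj, PySem.Str.toList_lower, PySem.Chars.lower]
    exact map_eq_self_iff _ _
  rcases Bool.eq_false_or_eq_true (s.toList.any fun c => decide (PySem.Chars.lowerChar c ≠ c)) with h | h
  case inl => rw [h, Bool.not_true]
              rcases Bool.eq_false_or_eq_true (PySem.Str.lower s == s) with hb | hb
              · exfalso
                obtain ⟨c, hc, hne⟩ := List.any_eq_true.mp h
                exact (by simpa using hne : PySem.Chars.lowerChar c ≠ c) (key.mp (beq_iff_eq.mp hb) c hc)
              · exact hb
  · rw [h]
    have h' : ∀ c ∈ s.toList, PySem.Chars.lowerChar c = c := by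
      intro c hc
      by_contra hne
      have ht : (s.toList.any fun c => decide (PySem.Chars.lowerChar c ≠ c)) = true :=
        List.any_eq_true.mpr ⟨c, hc, by simpa using hne⟩
      rw [h] at ht
      exact absurd ht (by decide)
    simp [key.mpr h']

theorem not_decide_forall_any {α : Type} [DecidableEq α] (l : List α) (f : α → α)
    {inst : Decidable (∀ x ∈ l, f x = x)} :
    (!@decide (∀ x ∈ l, f x = x) inst) = l.any (fun c => !decide (f c = c)) := by
  by_cases hP : ∀ x ∈ l, f x = x
  · rw [decide_eq_true hP]
    symm
    simp only [Bool.not_true, List.any_eq_false]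
    intro c hc
    simp [hP c hc]
  · rw [decide_eq_false hP]
    symm
    rw [Bool.not_false]
    rcases not_forall.mp hP with ⟨c, hc⟩
    rcases Classical.not_imp.mp hc with ⟨hmem, hne⟩
    exact List.any_eq_true.mpr ⟨c, hmem, by simp [hne]⟩

theorem all_eq_not_any_not' (l : List Char) (p : Char → Bool) :
    l.all p = !l.any fun c => !p c := by
  induction l with
  | nil => rfl
  | cons x xs ih => cases h : p x <;> simp [h, ih]

-- ===== VERDICT (by name: the statement is the Claim_ definition above) =====
theorem is_spotify_id_spec : Claim_equal_is_spotify_id := by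
  intro s _
  unfold Spec_is_spotify_id is_spotify_id is_spotify_id_alt pvStrIsdecimal
  simp only [flags_foldl, Bool.false_or, upper_eq_iff, lower_eq_iff,
    all_eq_not_any_not' s.toList (fun c => PySem.Chars.isdigit c)]
  by_cases hlen : PySem.Str.len s < 22 <;>
    by_cases h1 : s.toList.any (fun c => PySem.Chars.isdigit c) <;>
      by_cases h2 : s.toList.any (fun c => !PySem.Chars.isdigit c) <;>
        by_cases h3 : s.toList.any (fun c => decide (PySem.Chars.upperChar c ≠ c)) <;>
          by_cases h4 : s.toList.any (fun c => decide (PySem.Chars.lowerChar c ≠ c)) <;>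
            simp [hlen, h1, h2, h3, h4, not_decide_forall_any]
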